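-- pv_equiv track=rewrite | github.com/VVeiLiao/StackExchange_Analysis_Project | project/Siu_Liao_Final_Project.py | removeXMLTags
-- ===== SOURCE A (Python) =====
-- def removeXMLTags(text):
--     '''
--     Given a string of content, remove all occurences of XML tags.
--     (XML tags is anything that starts with '<' and ends with '>')
--
--     @param text String. A string of text.
--
--     @return a String with all occurences of XML tags removed
--     '''
--
--     textList = list(text)
--     # Remove All the XML tags
--     j = 0
--     while j < len(textList):
--         if textList[j] == "<":
--             while textList[j] != ">":
--                 textList.pop(j)
--             textList.pop(j)
--         else:
--             j += 1
--
--     # Convert list back into string and return the result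
--     return ''.join(textList)
-- ===== SOURCE B (Python) =====
-- def removeXMLTags(text):
--     '''Single-pass state machine: copy characters outside tags, skip those inside.'''
--     out = []
--     in_tag = False
--     for ch in text:
--         if in_tag:
--             if ch == '>':
--                 in_tag = False
--         elif ch == '<':
--             in_tag = True
--         else:
--             out.append(ch)
--     return ''.join(out)
-- ===== Notes on version B (the rewrite author's own statement) =====
-- stated objective: faster
-- what changed: Replaced the index-and-pop rescanning loop over a mutable list (each pop shifts the tail, giving quadratic work) by a single forward state-machine pass with an in_tag flag that appends kept characters once.
-- outside the precondition, e.g. on removeXMLTags('a<b'): A raises IndexError, B returns 'a'; on removeXMLTags('<'): A raises IndexError, B returns ''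
import Mathlib
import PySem

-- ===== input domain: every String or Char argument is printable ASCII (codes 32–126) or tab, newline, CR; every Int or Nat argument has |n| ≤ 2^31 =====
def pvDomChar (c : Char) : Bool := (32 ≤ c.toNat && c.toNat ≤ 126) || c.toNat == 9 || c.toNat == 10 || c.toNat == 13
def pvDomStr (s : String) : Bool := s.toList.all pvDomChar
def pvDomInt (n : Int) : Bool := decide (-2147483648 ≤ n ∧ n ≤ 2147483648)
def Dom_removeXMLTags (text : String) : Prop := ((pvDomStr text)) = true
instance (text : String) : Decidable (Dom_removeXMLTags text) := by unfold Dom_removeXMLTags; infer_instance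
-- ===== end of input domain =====

-- B replaces A's quadratic index-and-pop loop by a single forward state-machine pass (objective: faster).


-- ===== PORT A =====
-- A's inner 'while textList[j] != ">": textList.pop(j)' then 'textList.pop(j)':
-- pops chars at the cursor until a '>' is popped; none = IndexError (ran off the end).
def pvDropTag : List Char → Option (List Char)
  | [] => none
  | c :: rest => if c = '>' then some rest else pvDropTag rest

theorem pvDropTag_length : ∀ (l l' : List Char), pvDropTag l = some l' → l'.length < l.length := by
  intro l
  induction l with
  | nil => intro l' h; simp [pvDropTag] at h
  | cons c rest ih =>
    intro l' h'
    simp only [pvDropTag] at h'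
    split at h'
    · cases h'; simp
    · have := ih l' h'; simp; omega

-- outer loop: acc = the kept prefix (before index j), second arg = the list from index j on
def pvALoop (acc : List Char) : List Char → Option (List Char)
  | [] => some acc
  | c :: rest =>
    if c = '<' then
      match h : pvDropTag (c :: rest) with
      | none => none            -- Python raises IndexError here (excluded by Pre_)
      | some rest' => pvALoop acc rest'
    else pvALoop (acc ++ [c]) rest
termination_by l => l.length
decreasing_by
  · exact pvDropTag_length _ _ h
  · simp

def removeXMLTags (text : String) : String :=
  match pvALoop [] text.toList with
  | some l => String.ofList l
  | none => ""                  -- Python raises IndexError here (excluded by Pre_)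

-- ===== PORT B =====
def pvBStep (st : Bool × List Char) (ch : Char) : Bool × List Char :=
  if st.1 then
    if ch = '>' then (false, st.2) else (true, st.2)
  else if ch = '<' then (true, st.2)
  else (false, st.2 ++ [ch])

def removeXMLTags_alt (text : String) : String :=
  String.ofList (text.toList.foldl pvBStep (false, [])).2

-- ===== PRECONDITION & SPEC =====
-- Pre_ excludes exactly the strings on which A raises IndexError: those with a '<' after the last '>'.
def Pre_removeXMLTags (text : String) : Prop :=
  '<' ∉ (text.toList.reverse.takeWhile (· ≠ '>'))
instance (text : String) : Decidable (Pre_removeXMLTags text) := by unfold Pre_removeXMLTags; infer_instance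
def pvWitness_removeXMLTags : String := "a<b>c"

def Spec_removeXMLTags (text : String) (out : String) : Prop := out = removeXMLTags_alt text
instance (text : String) (out : String) : Decidable (Spec_removeXMLTags text out) := by unfold Spec_removeXMLTags; infer_instance

-- ===== CLAIM (what is proved, stated in full; the proofs are below) =====
def Claim_equal_removeXMLTags : Prop := ∀ (text : String), Dom_removeXMLTags text → Pre_removeXMLTags text → Spec_removeXMLTags text (removeXMLTags text)

-- ===== LEMMAS AND PROOFS =====

-- 'every < has a later >' in split form, the invariant A's loop preserves
def pvGood (l : List Char) : Prop := ∀ l₁ l₂, l = l₁ ++ '<' :: l₂ → '>' ∈ l₂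

theorem pvGood_tail (c : Char) (l : List Char) (h : pvGood (c :: l)) : pvGood l := by
  intro l₁ l₂ he
  exact h (c :: l₁) l₂ (by simp [he])

theorem pvGood_head (l : List Char) (h : pvGood ('<' :: l)) : '>' ∈ l :=
  h [] l rfl

theorem pvDropTag_isSome (l : List Char) (h : '>' ∈ l) : ∃ l', pvDropTag l = some l' := by
  induction l with
  | nil => simp at h
  | cons c rest ih =>
    by_cases hc : c = '>'
    · exact ⟨rest, by simp [pvDropTag, hc]⟩
    · have : '>' ∈ rest := by
        rcases List.mem_cons.mp h with h1 | h1
        · exact absurd h1.symm hc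
        · exact h1
      obtain ⟨l', hl'⟩ := ih this
      exact ⟨l', by simp [pvDropTag, hc, hl']⟩

theorem pvGood_dropTag : ∀ (l l' : List Char), pvGood l → pvDropTag l = some l' → pvGood l' := by
  intro l
  induction l with
  | nil => intro l' _ h; simp [pvDropTag] at h
  | cons c rest ih =>
    intro l' hg h
    simp only [pvDropTag] at h
    split at h
    · cases h; exact pvGood_tail _ _ hg
    · exact ih l' (pvGood_tail _ _ hg) h

theorem pvBFold_drop : ∀ (l l' acc : List Char), pvDropTag l = some l' →
    l.foldl pvBStep (true, acc) = l'.foldl pvBStep (false, acc) := by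
  intro l
  induction l with
  | nil => intro l' acc h; simp [pvDropTag] at h
  | cons c rest ih =>
    intro l' acc h
    simp only [pvDropTag] at h
    split at h
    · cases h
      simp_all [List.foldl, pvBStep]
    · rename_i hc
      simp only [List.foldl, pvBStep, hc, if_false, if_true]
      exact ih l' acc h

theorem pvALoop_eq_fold : ∀ (acc l : List Char), pvGood l →
    pvALoop acc l = some (l.foldl pvBStep (false, acc)).2 := by
  intro acc l
  induction acc, l using pvALoop.induct with
  | case1 acc => intro _; simp [pvALoop]
  | case2 acc rest hnone =>
    -- dropTag returned none: contradicts pvGood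
    intro hg
    obtain ⟨l', hl'⟩ := pvDropTag_isSome ('<' :: rest) (by
      have := pvGood_head rest hg
      exact List.mem_cons_of_mem _ this)
    · exact absurd hl' (by simp [hnone])
  | case3 acc rest rest' hdrop ih =>
    intro hg
    have hg' : pvGood rest' := pvGood_dropTag _ _ hg hdrop
    have hdrop' : pvDropTag rest = some rest' := by
      simpa [pvDropTag] using hdrop
    rw [pvALoop]
    simp only [if_true]
    split
    · rename_i heq
      rw [heq] at hdrop; cases hdrop
    · rename_i r heq
      rw [heq] at hdrop
      injection hdrop with hr
      subst hr
      rw [ih hg']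
      have h2 : ('<' :: rest).foldl pvBStep (false, acc) = r.foldl pvBStep (false, acc) := by
        simp only [List.foldl, pvBStep]
        norm_num
        exact pvBFold_drop rest r acc hdrop'
      rw [h2]
  | case4 acc c rest hc ih =>
    intro hg
    rw [pvALoop]
    simp only [if_neg hc]
    rw [ih (pvGood_tail _ _ hg)]
    simp [List.foldl, pvBStep, hc]

theorem pvGood_of_pre_aux : ∀ (m r : List Char), '>' ∉ m →
    '<' ∈ (m ++ '<' :: r).takeWhile (· ≠ '>') := by
  intro m
  induction m with
  | nil => intro r _; simp
  | cons c m' ih =>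
    intro r h
    have hc : c ≠ '>' := fun he => h (by simp [he])
    simp only [List.cons_append, List.takeWhile]
    simp only [hc, ne_eq, not_false_iff, decide_true]
    exact List.mem_cons_of_mem _ (ih r (fun hm => h (List.mem_cons_of_mem _ hm)))

theorem pvGood_of_pre (l : List Char) (h : '<' ∉ l.reverse.takeWhile (· ≠ '>')) : pvGood l := by
  intro l₁ l₂ he
  by_contra hmem
  apply h
  rw [he]
  have : (l₁ ++ '<' :: l₂).reverse = l₂.reverse ++ '<' :: l₁.reverse := by
    simp [List.reverse_append]
  rw [this]
  exact pvGood_of_pre_aux _ _ (by simpa using hmem)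

-- ===== VERDICT (by name: the statement is the Claim_ definition above) =====
theorem removeXMLTags_spec : Claim_equal_removeXMLTags := by
  intro text _ hpre
  unfold Spec_removeXMLTags removeXMLTags removeXMLTags_alt
  rw [pvALoop_eq_fold [] text.toList (pvGood_of_pre _ hpre)]
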